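-- pv_equiv track=rewrite | github.com/Lucasgvdii/Take-The-Challenge | solutions_code/broken_keyboard.py | get_final_string
-- ===== SOURCE A (Python) =====
-- def get_final_string(input_string):
--
--     output_string=[]
--     pos=0
--
--     for i in input_string:
--         if i == "3":
--             if pos<len(output_string):
--                 output_string.pop(pos)
--         elif i == "-":
--             pos=0
--         elif i == "+":
--             pos=len(output_string)
--         elif i == "*":
--             if pos!=len(output_string):
--                 pos=pos+1
--         else:
--             output_string.insert(pos,i)
--             pos=pos+1
--     return list2str(output_string)
--
-- def list2str(klist):
--     string=""
--     for i in klist: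
--         string=string+i
--     return string
-- ===== SOURCE B (Python) =====
-- def get_final_string(input_string):
--     # Gap buffer: two stacks around the cursor instead of insert/pop at an index.
--     left = []   # text before the cursor, in order (top of stack = char just left of cursor)
--     right = []  # text after the cursor, reversed (top of stack = char just right of cursor)
--     for ch in input_string:
--         if ch == "3":
--             if right:
--                 right.pop()
--         elif ch == "-":
--             while left:
--                 right.append(left.pop())
--         elif ch == "+":
--             while right:
--                 left.append(right.pop())
--         elif ch == "*":
--             if right:
--                 left.append(right.pop())
--         else:
--             left.append(ch)
--     return "".join(left) + "".join(reversed(right))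
-- ===== Notes on version B (the rewrite author's own statement) =====
-- stated objective: faster
-- what changed: Replaces A's single list with O(n) insert/pop at the cursor index by a two-stack gap buffer whose insert, delete and cursor-step are O(1) stack pushes/pops (only the home/end keys move elements).
import Mathlib
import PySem

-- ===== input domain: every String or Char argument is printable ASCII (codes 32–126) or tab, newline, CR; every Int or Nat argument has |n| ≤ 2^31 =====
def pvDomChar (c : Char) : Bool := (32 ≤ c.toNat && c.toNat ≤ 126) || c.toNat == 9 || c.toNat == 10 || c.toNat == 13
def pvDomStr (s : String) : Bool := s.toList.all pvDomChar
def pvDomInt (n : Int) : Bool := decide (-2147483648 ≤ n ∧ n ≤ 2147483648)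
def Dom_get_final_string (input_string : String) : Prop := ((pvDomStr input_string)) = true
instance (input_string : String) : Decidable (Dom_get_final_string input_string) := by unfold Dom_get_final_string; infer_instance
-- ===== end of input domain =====

-- B replaces A's index-addressed list (insert/pop at the cursor, O(n) each) by a two-stack gap buffer.

-- ===== PORT A =====
-- helper list2str of A: string = string + i, char by char
def pvList2str (klist : List Char) : String :=
  String.ofList (klist.foldl (fun s i => s ++ [i]) [])

-- loop body of A: state (output_string, pos)
def pvStepA (st : List Char × Int) (i : Char) : List Char × Int :=
  let out := st.1
  let pos := st.2
  if i = '3' then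
    if pos < (out.length : Int) then
      match PySem.List.pop? out pos with
      | some r => (r.2, pos)
      | none => (out, pos)   -- unreachable: pos is in range here
    else (out, pos)
  else if i = '-' then (out, 0)
  else if i = '+' then (out, (out.length : Int))
  else if i = '*' then
    if pos ≠ (out.length : Int) then (out, pos + 1) else (out, pos)
  else (PySem.List.insert out pos i, pos + 1)

def get_final_string (input_string : String) : String :=
  let st := input_string.toList.foldl pvStepA ([], 0)
  pvList2str st.1

-- ===== PORT B =====
-- 'while src: dst.append(src.pop())' — move the whole stack src onto dst
def pvMove (src dst : List Char) : List Char × List Char :=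
  if h : src = [] then (src, dst)
  else pvMove src.dropLast (dst ++ [src.getLast h])
termination_by src.length
decreasing_by
  have : src.length ≠ 0 := by simpa [List.length_eq_zero_iff] using h
  simp [List.length_dropLast]; omega

-- loop body of B: state (left, right); right is the text after the cursor, reversed
def pvStepB (st : List Char × List Char) (ch : Char) : List Char × List Char :=
  let left := st.1
  let right := st.2
  if ch = '3' then
    if right ≠ [] then (left, right.dropLast) else (left, right)
  else if ch = '-' then pvMove left right
  else if ch = '+' then
    let m := pvMove right left
    (m.2, m.1)
  else if ch = '*' then
    if right ≠ [] then (left ++ [right.getLast!], right.dropLast) else (left, right)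
  else (left ++ [ch], right)

def get_final_string_alt (input_string : String) : String :=
  let st := input_string.toList.foldl pvStepB ([], [])
  String.ofList (PySem.Chars.join [] (st.1.map (fun c => [c])) ++
                 PySem.Chars.join [] (st.2.reverse.map (fun c => [c])))

-- ===== PRECONDITION & SPEC =====
def Spec_get_final_string (input_string : String) (out : String) : Prop := out = get_final_string_alt input_string
instance (input_string : String) (out : String) : Decidable (Spec_get_final_string input_string out) := by unfold Spec_get_final_string; infer_instance

-- ===== CLAIM (what is proved, stated in full; the proofs are below) =====
def Claim_equal_get_final_string : Prop := ∀ (input_string : String), Dom_get_final_string input_string → Spec_get_final_string input_string (get_final_string input_string)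

-- ===== LEMMAS AND PROOFS =====

lemma pvMove_eq (src dst : List Char) : pvMove src dst = ([], dst ++ src.reverse) := by
  induction src using List.reverseRecOn generalizing dst with
  | nil => simp [pvMove]
  | append_singleton xs x ih =>
      rw [pvMove]
      simp [ih]

lemma pvReverse_ne (m : List Char) (h : m ≠ []) :
    m.reverse = m.getLast! :: m.dropLast.reverse := by
  conv_lhs => rw [← List.dropLast_concat_getLast h]
  rw [List.reverse_concat, List.getLast!_eq_getLast?_getD, List.getLast?_eq_some_getLast h, Option.getD_some]

lemma pvStep_inv (i : Char) (l r : List Char) :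
    pvStepA (l ++ r.reverse, (l.length : Int)) i =
      ((pvStepB (l, r) i).1 ++ (pvStepB (l, r) i).2.reverse,
       ((pvStepB (l, r) i).1.length : Int)) := by
  unfold pvStepA pvStepB
  by_cases h3 : i = '3'
  · subst h3
    rcases r with _ | ⟨x, rs⟩
    · norm_num
    · have hlt : l.length < (l ++ (x :: rs).reverse).length := by simp
      have hpop := PySem.List.pop?_natCast (l ++ (x :: rs).reverse) l.length hlt
      simp only [if_pos (show ((l.length : Int)) < ((l ++ (x :: rs).reverse).length : Int) from by exact_mod_cast hlt)]
      rw [hpop]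
      simp only []
      refine Prod.ext ?_ rfl
      show (l ++ (x :: rs).reverse).eraseIdx l.length = l ++ (x :: rs).dropLast.reverse
      rw [List.eraseIdx_append_of_length_le (le_refl _), Nat.sub_self,
          List.eraseIdx_zero, List.tail_reverse]
  · by_cases hm : i = '-'
    · simp [hm, pvMove_eq]
    · by_cases hp : i = '+'
      · simp [hp, pvMove_eq]
      · by_cases hs : i = '*'
        · subst hs
          rcases r with _ | ⟨x, rs⟩
          · simp [h3, hm, hp]
          · have hne : ((l.length : Int)) ≠ ((l ++ (x :: rs).reverse).length : Int) := by
              simp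
              omega
            have hg : (x :: rs).reverse = (x :: rs).getLast! :: (x :: rs).dropLast.reverse :=
              pvReverse_ne _ (by simp)
            simp [h3, hm, hp, hg]
            omega
        · have hins : PySem.List.insert (l ++ r.reverse) (l.length : Int) i =
              l ++ i :: r.reverse := by
            rw [PySem.List.insert_natCast _ _ _ (by simp)]
            simp [List.take_left', List.drop_left']
          simp only [h3, hm, hp, hs, ite_false]
          rw [hins]
          simp

lemma pvFold_inv (cs : List Char) (l r : List Char) :
    cs.foldl pvStepA (l ++ r.reverse, (l.length : Int)) =
      ((cs.foldl pvStepB (l, r)).1 ++ (cs.foldl pvStepB (l, r)).2.reverse,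
       ((cs.foldl pvStepB (l, r)).1.length : Int)) := by
  induction cs generalizing l r with
  | nil => simp
  | cons c cs ih =>
      simp only [List.foldl_cons]
      rw [pvStep_inv c l r]
      exact ih (pvStepB (l, r) c).1 (pvStepB (l, r) c).2

lemma pvList2str_eq (klist : List Char) : pvList2str klist = String.ofList klist := by
  unfold pvList2str
  rw [PySem.List.foldl_append_singleton]
  simp

-- ===== VERDICT (by name: the statement is the Claim_ definition above) =====
theorem get_final_string_spec : Claim_equal_get_final_string := by
  intro s _
  unfold Spec_get_final_string get_final_string get_final_string_alt
  have h := pvFold_inv s.toList [] []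
  simp only [List.nil_append, List.reverse_nil, List.length_nil, Int.ofNat_zero] at h
  rw [h, pvList2str_eq]
  simp only [PySem.Chars.join_nil_singletons]
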